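-- pv_equiv track=rewrite | github.com/HJun0725/coding-practice | 프로그래머스/1/42840. 모의고사/모의고사.py | solution
-- ===== SOURCE A (Python) =====
-- def solution(answers):
--     pattern1 = [1,2,3,4,5]
--     pattern2 = [2,1,2,3,2,4,2,5]
--     pattern3 = [3,3,1,1,2,2,4,4,5,5]
--
--     answer = [0,0,0]
--     for i in range(len(answers)):
--         if answers[i] == pattern1[i%5]:
--             answer[0] += 1
--         if answers[i] == pattern2[i%8]:
--             answer[1] += 1
--         if answers[i] == pattern3[i%10]:
--             answer[2] += 1
--
--     result = []
--     for i in range(len(answer)):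
--         if answer[i] == max(answer):
--             result.append(i+1)
--     return result
-- ===== SOURCE B (Python) =====
-- def solution(answers):
--     patterns = [[1, 2, 3, 4, 5], [2, 1, 2, 3, 2, 4, 2, 5], [3, 3, 1, 1, 2, 2, 4, 4, 5, 5]]
--     # Aggregate by residue class first: positions congruent mod 40 (= lcm 5,8,10) see the
--     # same pattern answers, so only the multiset of (i % 40, answer) pairs matters.
--     keys = [(i % 40, a) for i, a in enumerate(answers)]
--     freq = {}
--     for k in keys:
--         freq[k] = freq.get(k, 0) + 1
--     scores = [sum(c for (r, a), c in freq.items() if a == p[r % len(p)]) for p in patterns]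
--     m = max(scores)
--     return [i + 1 for i, s in enumerate(scores) if s == m]
-- ===== Notes on version B (the rewrite author's own statement) =====
-- stated objective: alternative
-- what changed: Instead of incrementing three counters per element, B builds a frequency table keyed by (position mod 40, answer) -- 40 = lcm(5,8,10), so positions in the same residue class face identical pattern answers -- and computes each pattern's score as a count-weighted sum over the table's at-most-200 distinct entries, then takes the max and filters.
import Mathlib
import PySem

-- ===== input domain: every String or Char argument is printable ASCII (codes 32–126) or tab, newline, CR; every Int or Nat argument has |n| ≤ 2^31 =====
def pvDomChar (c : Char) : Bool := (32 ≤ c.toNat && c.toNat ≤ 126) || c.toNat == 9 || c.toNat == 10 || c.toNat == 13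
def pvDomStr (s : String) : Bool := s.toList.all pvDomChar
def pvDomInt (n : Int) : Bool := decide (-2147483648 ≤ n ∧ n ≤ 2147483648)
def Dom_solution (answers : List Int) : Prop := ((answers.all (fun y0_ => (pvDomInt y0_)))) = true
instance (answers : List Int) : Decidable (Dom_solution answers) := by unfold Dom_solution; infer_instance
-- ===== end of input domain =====

-- B aggregates answers into a frequency table keyed by (i % 40, answer) — 40 = lcm(5,8,10),
-- so equal keys face identical pattern answers — then scores each pattern as a count-weighted
-- sum over the table's entries; an alternative algorithm, not claimed faster.


-- ===== PORT A =====
-- Literal port of A: one fused loop over range(len(answers)) incrementing the three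
-- counters; answer is the Python list [a0,a1,a2], kept as a triple (answer[k] += 1
-- becomes updating the k-th component).  Indexing uses pyGetD with default 0: every
-- index taken (i in range(len(answers)), i%5 into a length-5 list, …) is in range.
def solution (answers : List Int) : List Int :=
  let pattern1 : List Int := [1,2,3,4,5]
  let pattern2 : List Int := [2,1,2,3,2,4,2,5]
  let pattern3 : List Int := [3,3,1,1,2,2,4,4,5,5]
  let answer : Int × Int × Int :=
    (PySem.List.pyRange 0 (PySem.List.len answers) 1).foldl
      (fun (answer : Int × Int × Int) i =>
        let a0 := if PySem.List.pyGetD answers i 0 == PySem.List.pyGetD pattern1 (PySem.Int.mod i 5) 0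
                  then answer.1 + 1 else answer.1
        let a1 := if PySem.List.pyGetD answers i 0 == PySem.List.pyGetD pattern2 (PySem.Int.mod i 8) 0
                  then answer.2.1 + 1 else answer.2.1
        let a2 := if PySem.List.pyGetD answers i 0 == PySem.List.pyGetD pattern3 (PySem.Int.mod i 10) 0
                  then answer.2.2 + 1 else answer.2.2
        (a0, a1, a2))
      (0, 0, 0)
  let answerL : List Int := [answer.1, answer.2.1, answer.2.2]
  (PySem.List.pyRange 0 (PySem.List.len answerL) 1).foldl
    (fun result i =>
      if PySem.List.pyGetD answerL i 0 == (PySem.List.max? answerL (fun x => x)).getD 0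
      then result ++ [i + 1] else result)
    []

-- ===== PORT B =====
-- Port of B: keys = [(i % 40, a) for i, a in enumerate(answers)]; freq = dict of counts
-- ('freq[k] = freq.get(k, 0) + 1' is the insert/getD+1 fold); each score is the
-- count-weighted sum over freq.items() of the entries whose class matches the pattern.
def solution_alt (answers : List Int) : List Int :=
  let patterns : List (List Int) := [[1,2,3,4,5], [2,1,2,3,2,4,2,5], [3,3,1,1,2,2,4,4,5,5]]
  let keys : List (Int × Int) :=
    (PySem.List.enumerate answers 0).map (fun ia => (PySem.Int.mod ia.1 40, ia.2))
  let freq : PySem.Dict (Int × Int) Int :=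
    keys.foldl (fun d k => d.insert k (d.getD k 0 + 1)) PySem.Dict.empty
  let scores : List Int := patterns.map (fun p =>
    ((freq.items.filter (fun kc =>
        kc.1.2 == PySem.List.pyGetD p (PySem.Int.mod kc.1.1 (PySem.List.len p)) 0)).map (·.2)).sum)
  let m : Int := (PySem.List.max? scores (fun x => x)).getD 0
  ((PySem.List.enumerate scores 0).filter (fun is => is.2 == m)).map (fun is => is.1 + 1)

-- ===== PRECONDITION & SPEC =====
def Spec_solution (answers : List Int) (out : List Int) : Prop := out = solution_alt answers
instance (answers : List Int) (out : List Int) : Decidable (Spec_solution answers out) := by unfold Spec_solution; infer_instance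

-- ===== CLAIM =====
def Claim_equal_solution : Prop := ∀ (answers : List Int), Dom_solution answers → Spec_solution answers (solution answers)

-- ===== LEMMAS AND PROOFS =====

-- A's fused loop over enumerate pairs equals three independent 0/1-sums.
theorem pvTripleFold (q1 q2 q3 : Int × Int → Bool) (l : List (Int × Int)) (x y z : Int) :
    l.foldl (fun (s : Int × Int × Int) p =>
        (if q1 p then s.1 + 1 else s.1,
         if q2 p then s.2.1 + 1 else s.2.1,
         if q3 p then s.2.2 + 1 else s.2.2)) (x, y, z)
      = (x + (l.countP q1 : Int), y + (l.countP q2 : Int), z + (l.countP q3 : Int)) := by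
  induction l generalizing x y z with
  | nil => simp
  | cons h t ih =>
      simp only [List.foldl_cons, List.countP_cons, ih]
      split_ifs <;> simp only [Prod.mk.injEq] <;> push_cast <;> omega

-- A loop over range(len(xs)) reading xs[i] is a loop over enumerate(xs).
theorem pvFoldEnum {σ : Type} (g : σ → (Int × Int) → σ) (xs : List Int) (init : σ) :
    (PySem.List.pyRange 0 (PySem.List.len xs) 1).foldl
      (fun s i => g s (i, PySem.List.pyGetD xs i 0)) init
    = (PySem.List.enumerate xs 0).foldl g init := by
  rw [PySem.List.enumerate_eq_map_pyRange (d := 0), List.foldl_map]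

-- i % 40 % L = i % L for the indices i = ↑k produced by enumerate, when L divides 40.
theorem pvModMod (k : Nat) (L : Nat) (h : L ∣ 40) :
    PySem.Int.mod (PySem.Int.mod (k : Int) 40) (L : Int) = PySem.Int.mod (k : Int) (L : Int) := by
  have h40 : ((40 : Nat) : Int) = (40 : Int) := by norm_num
  rw [← h40, PySem.Int.mod_natCast, PySem.Int.mod_natCast, PySem.Int.mod_natCast,
      Nat.mod_mod_of_dvd k h]

-- First-occurrence dedup (Set.ofList) is a permutation of Mathlib's dedup.
theorem pvOfListPermDedup (ks : List (Int × Int)) : (PySem.Set.ofList ks).Perm ks.dedup := by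
  apply List.perm_of_nodup_nodup_toFinset_eq (PySem.Set.nodup_ofList ks) ks.nodup_dedup
  ext p
  simp [PySem.Set.mem_ofList]

-- B's count-weighted sum over the frequency table's matching entries is a countP of keys.
theorem pvFreqScore (ks : List (Int × Int)) (q : Int × Int → Bool) :
    ((((ks.foldl (fun d k => d.insert k (d.getD k 0 + 1)) PySem.Dict.empty).items.filter
        (fun kc => q kc.1)).map (·.2)).sum : Int) = (ks.countP q : Int) := by
  rw [PySem.Dict.foldl_insert_getD_add_one_eq_counter, PySem.Dict.items_counter]
  rw [List.filter_map, List.map_map]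
  simp only [Function.comp_def]
  rw [List.Perm.sum_eq (((pvOfListPermDedup ks).filter q).map _)]
  rw [← List.sum_map_count_dedup_filter_eq_countP q ks, Nat.cast_list_sum, List.map_map]
  simp only [Function.comp_def]
  congr 1
  apply List.map_congr_left
  intro x _
  simp only [List.count_eq_countP]
  congr 1
  apply List.countP_congr
  intro y _
  rw [Bool.eq_iff_iff]
  simp only [beq_iff_eq]
  tauto

-- Common tail: from the three scores, both programs build the same result list.
theorem pvTail (c1 c2 c3 m : Int) :
    (PySem.List.pyRange 0 (PySem.List.len [c1, c2, c3]) 1).foldl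
      (fun result i =>
        if PySem.List.pyGetD [c1, c2, c3] i 0 == m
        then result ++ [i + 1] else result) []
    = ((PySem.List.enumerate [c1, c2, c3] 0).filter
        (fun is => is.2 == m)).map (fun is => is.1 + 1) := by
  have h3 : PySem.List.pyRange 0 (PySem.List.len [c1, c2, c3]) 1 = [0, 1, 2] := by
    simp [PySem.List.pyRange_one, List.range_succ]
  rw [h3]
  by_cases h1 : c1 = m <;> by_cases h2 : c2 = m <;> by_cases hc3 : c3 = m <;>
    simp [PySem.List.enumerate_cons, h1, h2, hc3, PySem.List.pyGetD, PySem.List.pyGet?, PySem.List.pyIdx?]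

-- pvFreqScore specialised to a pattern's matching predicate (the literal shape in solution_alt).
theorem pvFreqScoreP (ks : List (Int × Int)) (p : List Int) :
    ((((ks.foldl (fun d k => d.insert k (d.getD k 0 + 1)) PySem.Dict.empty).items.filter
        (fun kc => kc.1.2 == PySem.List.pyGetD p (PySem.Int.mod kc.1.1 (PySem.List.len p)) 0)).map (·.2)).sum : Int)
    = (ks.countP (fun k => k.2 == PySem.List.pyGetD p (PySem.Int.mod k.1 (PySem.List.len p)) 0) : Int) :=
  pvFreqScore ks (fun k => k.2 == PySem.List.pyGetD p (PySem.Int.mod k.1 (PySem.List.len p)) 0)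

-- One pattern's B-score (a countP over the residue-class keys) is A's countP over enumerate.
theorem pvScoreEq (answers : List Int) (p : List Int) (hdvd : p.length ∣ 40) :
    (((PySem.List.enumerate answers 0).map (fun ia => (PySem.Int.mod ia.1 40, ia.2))).countP
        (fun k => k.2 == PySem.List.pyGetD p (PySem.Int.mod k.1 (PySem.List.len p)) 0) : Int)
    = ((PySem.List.enumerate answers 0).countP
        (fun ia => ia.2 == PySem.List.pyGetD p (PySem.Int.mod ia.1 (PySem.List.len p)) 0) : Int) := by
  rw [List.countP_map]
  congr 1
  apply List.countP_congr
  intro ia hia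
  obtain ⟨k, hk, rfl⟩ := (PySem.List.mem_enumerate_iff _ _ _).mp hia
  simp only [Function.comp_def, zero_add, PySem.List.len_eq]
  rw [pvModMod k p.length hdvd]

-- ===== VERDICT =====
theorem solution_spec : Claim_equal_solution := by
  intro answers _
  unfold Spec_solution solution solution_alt
  simp only [List.map_cons, List.map_nil]
  rw [pvFoldEnum (g := fun (s : Int × Int × Int) (p : Int × Int) =>
        (if p.2 == PySem.List.pyGetD [1,2,3,4,5] (PySem.Int.mod p.1 5) 0 then s.1 + 1 else s.1,
         if p.2 == PySem.List.pyGetD [2,1,2,3,2,4,2,5] (PySem.Int.mod p.1 8) 0 then s.2.1 + 1 else s.2.1,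
         if p.2 == PySem.List.pyGetD [3,3,1,1,2,2,4,4,5,5] (PySem.Int.mod p.1 10) 0 then s.2.2 + 1 else s.2.2)),
      pvTripleFold,
      pvFreqScoreP, pvFreqScoreP, pvFreqScoreP,
      pvScoreEq answers [1,2,3,4,5] (by norm_num),
      pvScoreEq answers [2,1,2,3,2,4,2,5] (by norm_num),
      pvScoreEq answers [3,3,1,1,2,2,4,4,5,5] (by norm_num)]
  simp only [PySem.List.len_eq, List.length_cons, List.length_nil, zero_add]
  exact pvTail _ _ _ _
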